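-- pv_equiv track=rewrite | github.com/spacetelescope/crds | hst/gentools/gen_rmap.py | expand_ors
-- ===== SOURCE A (Python) =====
-- def expand_ors(match):
--     if not match:
--         return [()]
--     else:
--         expanded = []
--         nested_vals = expand_ors(match[1:])
--         for val in str(match[0]).split("|"):
--             for nested in nested_vals:
--                 expanded.append((val,) + nested)
--         return expanded
-- ===== SOURCE B (Python) =====
-- import itertools
--
-- def expand_ors(match):
--     splits = [str(m).split("|") for m in match]
--     return list(itertools.product(*splits))
-- ===== Notes on version B (the rewrite author's own statement) =====
-- stated objective: faster
-- what changed: Replaces the explicit recursion over match[1:] (which copies the tail at every level and rebuilds tuples with nested append loops) by a single per-field split pass followed by itertools.product.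
import Mathlib
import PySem

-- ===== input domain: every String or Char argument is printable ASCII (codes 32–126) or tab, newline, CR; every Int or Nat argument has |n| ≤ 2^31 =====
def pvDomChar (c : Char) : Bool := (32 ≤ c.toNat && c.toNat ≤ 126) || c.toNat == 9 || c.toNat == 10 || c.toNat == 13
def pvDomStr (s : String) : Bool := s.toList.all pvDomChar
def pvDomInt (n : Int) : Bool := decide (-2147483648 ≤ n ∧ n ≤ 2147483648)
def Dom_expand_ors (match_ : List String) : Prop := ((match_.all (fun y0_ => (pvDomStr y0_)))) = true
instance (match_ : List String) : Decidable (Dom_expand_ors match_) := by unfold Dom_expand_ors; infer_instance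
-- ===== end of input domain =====

-- B: per-field splits then an iterative Cartesian product (itertools.product) instead of recursion with nested append loops; same output.

-- ===== PORT A =====
def expand_ors (match_ : List String) : List (List String) :=
  match match_ with
  | [] => [[]]
  | m :: rest =>
    let nested_vals := expand_ors rest
    (((PySem.Str.split? m "|").getD [])).foldl
      (fun expanded val =>
        nested_vals.foldl (fun e nested => e ++ [val :: nested]) expanded) []

-- ===== PORT B =====
def expand_ors_alt (match_ : List String) : List (List String) :=
  let splits := match_.map (fun m => (PySem.Str.split? m "|").getD [])
  splits.foldr (fun xs acc => xs.flatMap (fun x => acc.map (fun n => x :: n))) [[]]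

-- ===== PRECONDITION & SPEC =====
def Spec_expand_ors (match_ : List String) (out : List (List String)) : Prop := out = expand_ors_alt match_
instance (match_ : List String) (out : List (List String)) : Decidable (Spec_expand_ors match_ out) := by unfold Spec_expand_ors; infer_instance

-- ===== CLAIM (what is proved, stated in full; the proofs are below) =====
def Claim_equal_expand_ors : Prop := ∀ (match_ : List String), Dom_expand_ors match_ → Spec_expand_ors match_ (expand_ors match_)

-- ===== LEMMAS AND PROOFS =====
theorem inner_loop (N : List (List String)) (val : String) (e : List (List String)) :
    N.foldl (fun e nested => e ++ [val :: nested]) e = e ++ N.map (fun n => val :: n) := by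
  induction N generalizing e with
  | nil => simp
  | cons n ns ih => simp [List.foldl, ih]

theorem outer_loop (N : List (List String)) (l : List String) (acc : List (List String)) :
    l.foldl (fun expanded val => N.foldl (fun e nested => e ++ [val :: nested]) expanded) acc
      = acc ++ l.flatMap (fun x => N.map (fun n => x :: n)) := by
  induction l generalizing acc with
  | nil => simp
  | cons v vs ih => rw [List.foldl_cons, inner_loop, ih, List.flatMap_cons, List.append_assoc]

theorem expand_ors_eq (match_ : List String) :
    expand_ors match_
      = match_.foldr (fun m acc => ((PySem.Str.split? m "|").getD []).flatMap
          (fun x => acc.map (fun n => x :: n))) [[]] := by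
  induction match_ with
  | nil => simp [expand_ors]
  | cons m rest ih =>
    simp only [expand_ors, List.foldr, outer_loop, ih, List.nil_append]

theorem alt_eq (match_ : List String) :
    expand_ors_alt match_
      = match_.foldr (fun m acc => ((PySem.Str.split? m "|").getD []).flatMap
          (fun x => acc.map (fun n => x :: n))) [[]] := by
  simp [expand_ors_alt, List.foldr_map]

-- ===== VERDICT (by name: the statement is the Claim_ definition above) =====
theorem expand_ors_spec : Claim_equal_expand_ors := by
  intro match_ _
  unfold Spec_expand_ors
  rw [expand_ors_eq, alt_eq]
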